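-- pv_equiv track=rewrite | github.com/AndrewMonteith/DiagnosticDatasetScripts | diag_utils.py | by_delim
-- ===== SOURCE A (Python) =====
-- def consecutive_pairs(items):
--     # [1,2,3,4] -> [(1, 2), (2, 3), (3, 4)]
--     for i in range(len(items)-1):
--         yield (items[i], items[i+1])
--
-- def by_delim(items, delim):
--     matches = [i for (i, item) in enumerate(items)
--                if item == delim]
--
--     if len(matches) == 0:
--         yield items
--
--     for (i, j) in consecutive_pairs(matches):
--         yield items[i:j]
--
--     if len(matches) > 0:
--         yield items[matches[-1]:]
-- ===== SOURCE B (Python) =====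
-- def by_delim(items, delim):
--     # single streaming pass: keep the currently open segment (None until the
--     # first delimiter); yield a segment whenever a new delimiter opens the next
--     cur = None
--     for item in items:
--         if item == delim:
--             if cur is not None:
--                 yield cur
--             cur = [item]
--         elif cur is not None:
--             cur.append(item)
--     if cur is not None:
--         yield cur
--     else:
--         yield items
-- ===== Notes on version B (the rewrite author's own statement) =====
-- stated objective: simpler
-- what changed: Replaced the precomputed delimiter-index list plus index pairing and slicing with one streaming pass over the elements that maintains the currently open segment and yields it when the next delimiter is met (single pass, no index list or slice copies).
import Mathlib
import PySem

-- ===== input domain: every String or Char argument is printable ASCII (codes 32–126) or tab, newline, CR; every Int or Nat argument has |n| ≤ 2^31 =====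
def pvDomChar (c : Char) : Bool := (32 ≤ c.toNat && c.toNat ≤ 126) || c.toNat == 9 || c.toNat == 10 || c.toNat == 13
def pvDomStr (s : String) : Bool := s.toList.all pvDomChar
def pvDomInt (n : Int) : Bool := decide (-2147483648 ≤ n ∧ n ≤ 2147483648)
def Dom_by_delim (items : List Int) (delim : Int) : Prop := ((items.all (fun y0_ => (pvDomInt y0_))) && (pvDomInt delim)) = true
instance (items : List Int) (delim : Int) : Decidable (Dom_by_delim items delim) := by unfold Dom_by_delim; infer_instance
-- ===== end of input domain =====

-- B replaces A's index-list + pairwise slicing with one streaming pass keeping the open segment (objective: simpler).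

-- ===== PORT A =====
-- consecutive_pairs: indices from range(len-1) are always in range, so pyGetD's default is never used
def consecutivePairs (xs : List Int) : List (Int × Int) :=
  (PySem.List.pyRange 0 (xs.length - 1) 1).map
    (fun i => (PySem.List.pyGetD xs i 0, PySem.List.pyGetD xs (i + 1) 0))

def by_delim (items : List Int) (delim : Int) : List (List Int) :=
  let matchList := ((PySem.List.enumerate items).filter (fun p => p.2 == delim)).map (·.1)
  (if matchList.length = 0 then [items] else []) ++
  ((consecutivePairs matchList).map (fun p => PySem.List.slice items (some p.1) (some p.2))) ++
  (if matchList.length > 0 then [PySem.List.slice items (PySem.List.pyGet? matchList (-1)) none] else [])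

-- ===== PORT B =====
def altStep (delim : Int) (s : List (List Int) × Option (List Int)) (item : Int) :
    List (List Int) × Option (List Int) :=
  if item = delim then
    (match s.2 with
     | some c => s.1 ++ [c]
     | none => s.1, some [item])
  else
    match s.2 with
    | some c => (s.1, some (c ++ [item]))
    | none => (s.1, none)

def by_delim_alt (items : List Int) (delim : Int) : List (List Int) :=
  let r := items.foldl (altStep delim) ([], none)
  match r.2 with
  | some c => r.1 ++ [c]
  | none => [items]

-- ===== PRECONDITION & SPEC =====
def Spec_by_delim (items : List Int) (delim : Int) (out : List (List Int)) : Prop := out = by_delim_alt items delim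
instance (items : List Int) (delim : Int) (out : List (List Int)) : Decidable (Spec_by_delim items delim out) := by unfold Spec_by_delim; infer_instance

-- ===== CLAIM (what is proved, stated in full; the proofs are below) =====
def Claim_equal_by_delim : Prop := ∀ (items : List Int) (delim : Int), Dom_by_delim items delim → Spec_by_delim items delim (by_delim items delim)

-- ===== LEMMAS AND PROOFS =====

-- canonical segment function: first segment is head :: run of non-delims, recurse on the rest
def segs (d : Int) : List Int → List (List Int)
  | [] => []
  | x :: xs => (x :: xs.takeWhile (· ≠ d)) :: segs d (xs.dropWhile (· ≠ d))
  termination_by l => l.length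
  decreasing_by
    simp only [List.length_cons]
    exact Nat.lt_succ_of_le (List.length_dropWhile_le _ _)

-- the common canonical form
def canon (items : List Int) (d : Int) : List (List Int) :=
  match items.dropWhile (· ≠ d) with
  | [] => [items]
  | l => segs d l

-- matches-comprehension with a general enumerate start
def ms (d : Int) (s : Int) (xs : List Int) : List Int :=
  ((PySem.List.enumerate xs s).filter (fun p => p.2 == d)).map (·.1)

theorem ms_cons (d s x : Int) (xs : List Int) :
    ms d s (x :: xs) = (if x = d then [s] else []) ++ ms d (s + 1) xs := by
  by_cases h : x = d <;>
    simp [ms, PySem.List.enumerate_cons, h]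

theorem ms_shift (d : Int) (xs : List Int) : ∀ s, ms d s xs = (ms d 0 xs).map (· + s) := by
  induction xs with
  | nil => intro s; simp [ms]
  | cons x xs ih =>
    intro s
    rw [ms_cons, ms_cons, ih (s + 1), ih (0 + 1)]
    by_cases h : x = d <;> simp [h, List.map_map, Function.comp_def] <;>
      exact fun a _ => by omega

theorem ms_nil_iff (d : Int) (xs : List Int) (s : Int) : ms d s xs = [] ↔ d ∉ xs := by
  induction xs generalizing s with
  | nil => simp [ms]
  | cons x xs ih =>
    rw [ms_cons]
    by_cases h : x = d <;> simp [h, ih (s + 1)]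
    exact fun _ he => h he.symm

theorem ms_nonneg (d : Int) (xs : List Int) (s : Int) (i : Int) (hi : i ∈ ms d s xs) : s ≤ i := by
  induction xs generalizing s with
  | nil => simp [ms] at hi
  | cons x xs ih =>
    rw [ms_cons] at hi
    rcases List.mem_append.1 hi with h | h
    · split_ifs at h <;> simp at h; omega
    · have := ih (s + 1) h; omega

-- head of the match list is the length of the non-delim prefix
theorem ms_head (d : Int) (xs : List Int) (hx : d ∈ xs) :
    ∃ t, ms d 0 xs = ((xs.takeWhile (· ≠ d)).length : Int) :: t := by
  induction xs with
  | nil => simp at hx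
  | cons x xs ih =>
    rw [ms_cons]
    by_cases h : x = d
    · exact ⟨ms d (0 + 1) xs, by simp [h, List.takeWhile]⟩
    · have hx' : d ∈ xs := by
        rcases List.mem_cons.1 hx with h' | h'
        · exact absurd h'.symm h
        · exact h'
      obtain ⟨t, ht⟩ := ih hx'
      refine ⟨t.map (· + 1), ?_⟩
      rw [ms_shift d xs (0 + 1), ht]
      simp [h]

-- consecutivePairs is zip with the tail
theorem cp_eq_zip (xs : List Int) : consecutivePairs xs = xs.zip xs.tail := by
  have hcast : ((xs.length : Int) - 1) = ((xs.length - 1 : Nat) : Int) ∨ xs = [] := by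
    cases xs with
    | nil => exact Or.inr rfl
    | cons a as => left; simp
  rcases hcast with hcast | rfl
  · apply List.ext_getElem?
    intro k
    rw [consecutivePairs, hcast]
    by_cases hk : k < xs.length - 1
    · rw [PySem.List.getElem?_map_pyRange_zero _ (xs.length - 1) k hk]
      have h1 : k < xs.length := by omega
      have h2 : k + 1 < xs.length := by omega
      have h3 : k < xs.tail.length := by simp [List.length_tail]; omega
      have hz : k < (xs.zip xs.tail).length := by simp [List.length_zip]; omega
      rw [List.getElem?_eq_getElem hz, List.getElem_zip]
      have e1 : PySem.List.pyGetD xs (k : Int) 0 = xs[k] := by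
        simp [PySem.List.pyGetD_natCast, List.getD_eq_getElem?_getD, h1]
      have e2 : PySem.List.pyGetD xs ((k : Int) + 1) 0 = xs.tail[k] := by
        have ht : ((k : Int) + 1).toNat = k + 1 := by omega
        rw [PySem.List.pyGetD_eq_getElem xs 0 (by omega) (by omega)]
        simp [ht, List.getElem_tail]
      rw [e1, e2]
    · have hz : ¬ k < (xs.zip xs.tail).length := by simp [List.length_zip, List.length_tail]; omega
      rw [List.getElem?_eq_none, List.getElem?_eq_none]
      · omega
      · simp [PySem.List.length_pyRange_one]; omega
  · simp [consecutivePairs]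

-- by_delim written via ms
theorem by_delim_eq (items : List Int) (d : Int) :
    by_delim items d =
      (if (ms d 0 items).length = 0 then [items] else []) ++
      ((consecutivePairs (ms d 0 items)).map (fun p => PySem.List.slice items (some p.1) (some p.2))) ++
      (if (ms d 0 items).length > 0 then [PySem.List.slice items (PySem.List.pyGet? (ms d 0 items) (-1)) none] else []) := rfl

theorem cp_nil : consecutivePairs ([] : List Int) = [] := by
  simp [cp_eq_zip]

theorem slice_cons_succ (x : Int) (xs : List Int) (a b : Int) (ha : 0 ≤ a) (hb : 0 ≤ b) :
    PySem.List.slice (x :: xs) (some (a + 1)) (some (b + 1)) = PySem.List.slice xs (some a) (some b) := by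
  rw [PySem.List.slice_toNat _ (by omega) (by omega), PySem.List.slice_toNat _ ha hb]
  have h1 : (a + 1).toNat = a.toNat + 1 := by omega
  have h2 : (b + 1).toNat = b.toNat + 1 := by omega
  rw [h1, h2, List.drop_succ_cons]
  congr 1
  omega

theorem shift_slices (x d : Int) (xs : List Int) :
    (consecutivePairs ((ms d 0 xs).map (· + 1))).map
        (fun p => PySem.List.slice (x :: xs) (some p.1) (some p.2))
      = (consecutivePairs (ms d 0 xs)).map (fun p => PySem.List.slice xs (some p.1) (some p.2)) := by
  rw [cp_eq_zip, cp_eq_zip, ← List.map_tail, List.zip_map, List.map_map]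
  apply List.map_congr_left
  intro p hp
  rcases p with ⟨a, b⟩
  obtain ⟨h1, h2⟩ := List.of_mem_zip hp
  have ha : 0 ≤ a := ms_nonneg d xs 0 a h1
  have hb : 0 ≤ b := ms_nonneg d xs 0 b (List.mem_of_mem_tail h2)
  exact slice_cons_succ x xs a b ha hb

theorem shift_last (x d : Int) (xs : List Int) (hne : ms d 0 xs ≠ []) :
    PySem.List.slice (x :: xs) (PySem.List.pyGet? ((ms d 0 xs).map (· + 1)) (-1)) none
      = PySem.List.slice xs (PySem.List.pyGet? (ms d 0 xs) (-1)) none := by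
  rcases h : (ms d 0 xs).getLast? with _ | l
  · exact absurd (List.getLast?_eq_none_iff.mp h) hne
  · have hl0 : 0 ≤ l := ms_nonneg d xs 0 l (List.mem_of_getLast? h)
    rw [PySem.List.pyGet?_neg_one, PySem.List.pyGet?_neg_one, List.getLast?_map, h]
    simp only [Option.map_some]
    rw [PySem.List.slice_from _ (by omega : (0:Int) ≤ l + 1), PySem.List.slice_from _ hl0]
    have ht : (l + 1).toNat = l.toNat + 1 := by omega
    rw [ht, List.drop_succ_cons]

theorem by_delim_of_not_mem (items : List Int) (d : Int) (h : d ∉ items) :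
    by_delim items d = [items] := by
  have hms : ms d 0 items = [] := (ms_nil_iff d items 0).2 h
  rw [by_delim_eq, hms]
  simp [cp_nil]

theorem canon_of_not_mem (items : List Int) (d : Int) (h : d ∉ items) :
    canon items d = [items] := by
  have hd : items.dropWhile (· ≠ d) = [] := by
    rw [List.dropWhile_eq_nil_iff]
    intro y hy
    simp only [ne_eq, decide_eq_true_eq]
    exact fun e => h (e ▸ hy)
  unfold canon
  rw [hd]

theorem canon_cons_ne (x d : Int) (xs : List Int) (hxd : x ≠ d) (hdxs : d ∈ xs) :
    canon (x :: xs) d = canon xs d := by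
  have hd : (x :: xs).dropWhile (· ≠ d) = xs.dropWhile (· ≠ d) := by
    simp [hxd]
  rcases h : xs.dropWhile (· ≠ d) with _ | ⟨y, ys⟩
  · exfalso
    rw [List.dropWhile_eq_nil_iff] at h
    have := h d hdxs
    simp at this
  · unfold canon
    rw [hd, h]

theorem canon_cons_delim (d : Int) (xs : List Int) (hdxs : d ∈ xs) :
    canon (d :: xs) d = (d :: xs.takeWhile (· ≠ d)) :: canon xs d := by
  have hd : (d :: xs).dropWhile (· ≠ d) = d :: xs := by
    simp
  rcases h : xs.dropWhile (· ≠ d) with _ | ⟨y, ys⟩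
  · exfalso
    rw [List.dropWhile_eq_nil_iff] at h
    have := h d hdxs
    simp at this
  · have h1 : canon (d :: xs) d = segs d (d :: xs) := by unfold canon; rw [hd]
    have h2 : canon xs d = segs d (y :: ys) := by unfold canon; rw [h]
    rw [h1, h2, segs, h]

theorem take_takeWhile (xs : List Int) (p : Int → Bool) :
    xs.take (xs.takeWhile p).length = xs.takeWhile p :=
  (List.prefix_iff_eq_take.1 (List.takeWhile_prefix p)).symm

theorem ms_one (d : Int) (xs : List Int) : ms d 1 xs = (ms d 0 xs).map (· + 1) := by
  simpa using ms_shift d xs 1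

-- the head-is-delimiter case of the main induction
theorem by_delim_cons_delim (d : Int) (xs : List Int) (ih : by_delim xs d = canon xs d) :
    by_delim (d :: xs) d = canon (d :: xs) d := by
  by_cases hdxs : d ∈ xs
  · rcases hm : ms d 0 xs with _ | ⟨m0, t⟩
    · exact absurd ((ms_nil_iff d xs 0).1 hm) (by simpa using hdxs)
    obtain ⟨t', ht'⟩ := ms_head d xs hdxs
    rw [hm] at ht'
    obtain ⟨hm0, -⟩ := List.cons.inj ht'
    have hcons : ms d 0 (d :: xs) = 0 :: (ms d 0 xs).map (· + 1) := by
      rw [ms_cons]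
      simp [ms_one]
    have hfirst : PySem.List.slice (d :: xs) (some 0) (some (m0 + 1)) =
        d :: xs.takeWhile (· ≠ d) := by
      rw [PySem.List.slice_toNat _ le_rfl (by rw [hm0]; positivity)]
      have hnn : (0:Int) ≤ m0 := by rw [hm0]; positivity
      have ht : (m0 + 1).toNat = m0.toNat + 1 := by omega
      rw [ht]
      simp only [Int.toNat_zero, Nat.sub_zero, List.drop_zero, List.take_succ_cons]
      congr 1
      have hlen : m0.toNat = (xs.takeWhile (· ≠ d)).length := by rw [hm0]; simp
      rw [hlen, take_takeWhile]
    rw [by_delim_eq, hcons, hm]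
    simp only [List.map_cons]
    rw [if_neg (by simp : ¬ ((0:Int) :: (m0 + 1) :: t.map (fun x => x + 1)).length = 0),
      if_pos (by simp : ((0:Int) :: (m0 + 1) :: t.map (fun x => x + 1)).length > 0)]
    rw [cp_eq_zip]
    simp only [List.tail_cons, List.zip_cons_cons, List.map_cons]
    rw [hfirst]
    rw [show ((m0 + 1) :: t.map (fun x => x + 1)).zip (t.map (fun x => x + 1)) =
          consecutivePairs ((m0 :: t).map (· + 1)) from by
        rw [cp_eq_zip]; simp]
    rw [show ((m0 :: t).map (· + 1)) = (ms d 0 xs).map (· + 1) from by rw [hm]]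
    rw [shift_slices d d xs]
    have hlast : PySem.List.pyGet? ((0:Int) :: (m0 + 1) :: t.map (fun x => x + 1)) (-1) =
        PySem.List.pyGet? ((ms d 0 xs).map (· + 1)) (-1) := by
      rw [PySem.List.pyGet?_neg_one, PySem.List.pyGet?_neg_one, List.getLast?_cons_cons, hm]
      simp
    rw [hlast, shift_last d d xs (by rw [hm]; simp)]
    rw [canon_cons_delim d xs hdxs, ← ih, by_delim_eq, hm]
    simp
  · have hms : ms d 0 xs = [] := (ms_nil_iff d xs 0).2 hdxs
    have hcons : ms d 0 (d :: xs) = [0] := by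
      rw [ms_cons]
      simp [ms_one, hms]
    rw [by_delim_eq, hcons]
    rw [cp_eq_zip]
    simp only [List.length_cons, List.length_nil, List.tail_cons, List.zip_nil_right]
    have hget : PySem.List.pyGet? [(0:Int)] (-1) = some 0 := by
      rw [PySem.List.pyGet?_neg_one]; rfl
    rw [hget, PySem.List.slice_from _ le_rfl]
    have hd : (d :: xs).dropWhile (· ≠ d) = d :: xs := by
      simp
    have htw : xs.takeWhile (· ≠ d) = xs := by
      rw [List.takeWhile_eq_self_iff]
      intro y hy
      simp only [ne_eq, decide_eq_true_eq]
      exact fun e => hdxs (e ▸ hy)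
    have hdw : xs.dropWhile (· ≠ d) = [] := by
      rw [List.dropWhile_eq_nil_iff]
      intro y hy
      simp only [ne_eq, decide_eq_true_eq]
      exact fun e => hdxs (e ▸ hy)
    have h1 : canon (d :: xs) d = segs d (d :: xs) := by unfold canon; rw [hd]
    rw [h1, segs, htw, hdw, segs]
    simp

theorem by_delim_eq_canon (items : List Int) (d : Int) : by_delim items d = canon items d := by
  induction items with
  | nil =>
    rw [by_delim_of_not_mem [] d (by simp), canon_of_not_mem [] d (by simp)]
  | cons x xs ih =>
    by_cases hx : d ∈ x :: xs
    · by_cases hxd : x = d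
      · rw [hxd]
        exact by_delim_cons_delim d xs ih
      · have hdxs : d ∈ xs := by
          rcases List.mem_cons.1 hx with h' | h'
          · exact absurd h'.symm hxd
          · exact h'
        have hne : ms d 0 xs ≠ [] := fun h => ((ms_nil_iff d xs 0).1 h) hdxs
        have hcons : ms d 0 (x :: xs) = (ms d 0 xs).map (· + 1) := by
          rw [ms_cons]
          simp [hxd, ms_one]
        rw [by_delim_eq, hcons, shift_slices x d xs, shift_last x d xs hne,
          canon_cons_ne x d xs hxd hdxs, ← ih, by_delim_eq]
        have hlen0 : ¬ (ms d 0 xs).length = 0 := by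
          simpa [List.length_eq_zero_iff] using hne
        simp [hlen0]
    · rw [by_delim_of_not_mem _ _ hx, canon_of_not_mem _ _ hx]

-- B's loop with an open segment
theorem loop_some (d : Int) : ∀ (xs : List Int) (out : List (List Int)) (c : List Int),
    ∃ out' c', List.foldl (altStep d) (out, some c) xs = (out', some c') ∧
      out' ++ [c'] = out ++ (c ++ xs.takeWhile (· ≠ d)) :: segs d (xs.dropWhile (· ≠ d)) := by
  intro xs
  induction xs with
  | nil => exact fun out c => ⟨out, c, rfl, by simp [segs]⟩
  | cons y ys ih =>
    intro out c
    by_cases hy : y = d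
    · obtain ⟨o', c', h1, h2⟩ := ih (out ++ [c]) [y]
      refine ⟨o', c', by simpa [altStep, hy] using h1, ?_⟩
      rw [h2]
      simp [hy, segs]
    · obtain ⟨o', c', h1, h2⟩ := ih out (c ++ [y])
      refine ⟨o', c', by simpa [altStep, hy] using h1, ?_⟩
      rw [h2]
      simp [hy]

-- B's loop before any delimiter has been seen
theorem loop_none (d : Int) : ∀ (xs : List Int) (out : List (List Int)),
    List.foldl (altStep d) (out, none) xs =
      (match xs.dropWhile (· ≠ d) with
       | [] => (out, none)
       | y :: ys => List.foldl (altStep d) (out, some [y]) ys) := by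
  intro xs
  induction xs with
  | nil => intro out; rfl
  | cons y ys ih =>
    intro out
    by_cases hy : y = d
    · simp [hy, altStep]
    · rw [List.foldl_cons]
      have hstep : altStep d (out, none) y = (out, none) := by simp [altStep, hy]
      rw [hstep, ih out]
      simp [hy]

theorem loop_none_nil (d : Int) (xs : List Int) (out : List (List Int))
    (h : xs.dropWhile (· ≠ d) = []) :
    List.foldl (altStep d) (out, none) xs = (out, none) := by
  have h0 := loop_none d xs out
  rw [h] at h0
  exact h0

theorem loop_none_cons (d : Int) (xs : List Int) (out : List (List Int)) (y : Int) (ys : List Int)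
    (h : xs.dropWhile (· ≠ d) = y :: ys) :
    List.foldl (altStep d) (out, none) xs = List.foldl (altStep d) (out, some [y]) ys := by
  have h0 := loop_none d xs out
  rw [h] at h0
  exact h0

theorem alt_eq_canon (items : List Int) (d : Int) : by_delim_alt items d = canon items d := by
  rcases h : items.dropWhile (· ≠ d) with _ | ⟨y, ys⟩
  · have h0 := loop_none_nil d items [] h
    have hc : canon items d = [items] := by unfold canon; rw [h]
    rw [hc]
    simp [by_delim_alt, h0]
  · obtain ⟨o', c', h1, h2⟩ := loop_some d ys [] [y]
    have h0 := loop_none_cons d items [] y ys h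
    have hc : canon items d = segs d (y :: ys) := by unfold canon; rw [h]
    rw [hc, segs]
    simp only [by_delim_alt, h0, h1]
    rw [h2]
    simp

-- ===== VERDICT (by name: the statement is the Claim_ definition above) =====
theorem by_delim_spec : Claim_equal_by_delim := by
  intro items delim _
  unfold Spec_by_delim
  rw [by_delim_eq_canon, alt_eq_canon]
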